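-- pv_equiv track=rewrite | github.com/Fernix753/CursoPythonInformal | Proyecto Ta-Te-Ti/main.py | contar_igualdad
-- ===== SOURCE A (Python) =====
-- lista_simbolo = ['O', 'X']
--
-- def contar_igualdad(lista_valores, test_simbol):
--     contador = 0
--     enemy_simbol = lista_simbolo[lista_simbolo.index(test_simbol)-1]
--     for x in lista_valores:
--         if x == enemy_simbol:
--             return 0
--         if x == test_simbol:
--             contador += 1
--     return contador
-- ===== SOURCE B (Python) =====
-- lista_simbolo = ['O', 'X']
--
-- def contar_igualdad(lista_valores, test_simbol):
--     enemy_simbol = lista_simbolo[lista_simbolo.index(test_simbol)-1]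
--     counts = {}
--     for x in lista_valores:
--         counts[x] = counts.get(x, 0) + 1
--     if counts.get(enemy_simbol, 0):
--         return 0
--     return counts.get(test_simbol, 0)
-- ===== Notes on version B (the rewrite author's own statement) =====
-- stated objective: alternative
-- what changed: Replaces A's early-return counting loop by a frequency dictionary built in one pass; the answer is then read off the table: 0 if the enemy symbol has a nonzero count (its position is irrelevant since the result is always 0 when it occurs anywhere), else the table's count of the test symbol.
-- outside the precondition, e.g. on contar_igualdad(['O'], 'Z'): A raises ValueError, B raises ValueError
import Mathlib
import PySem

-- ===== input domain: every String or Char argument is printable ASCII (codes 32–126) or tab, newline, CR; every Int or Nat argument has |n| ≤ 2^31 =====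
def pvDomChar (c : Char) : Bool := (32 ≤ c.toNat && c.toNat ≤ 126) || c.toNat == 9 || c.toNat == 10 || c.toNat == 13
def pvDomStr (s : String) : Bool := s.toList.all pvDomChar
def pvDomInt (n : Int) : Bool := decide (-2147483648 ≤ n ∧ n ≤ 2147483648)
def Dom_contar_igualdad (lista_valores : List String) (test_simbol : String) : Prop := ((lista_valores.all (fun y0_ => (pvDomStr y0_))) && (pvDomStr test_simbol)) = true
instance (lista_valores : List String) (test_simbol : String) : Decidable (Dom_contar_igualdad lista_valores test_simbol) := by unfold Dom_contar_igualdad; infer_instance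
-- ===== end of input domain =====

-- B replaces A's early-return counting loop by a frequency dictionary built in one
-- pass, reading the answer off the table (0 if the enemy symbol occurs, else the
-- table's count of the test symbol); alternative decomposition, same cost.

-- ===== PORT A =====
-- the for-loop of A: early return 0 on the enemy symbol, else count test_simbol
def contarLoopA (enemy test : String) : List String → Int → Int
  | [], contador => contador
  | x :: xs, contador =>
      if x = enemy then 0
      else contarLoopA enemy test xs (if x = test then contador + 1 else contador)

def contar_igualdad (lista_valores : List String) (test_simbol : String) : Int :=
  match PySem.List.index? ["O", "X"] test_simbol with
  | none => 0   -- ValueError in Python; excluded by Pre_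
  | some i =>
    match PySem.List.pyGet? ["O", "X"] ((i : Int) - 1) with
    | none => 0 -- unreachable
    | some enemy_simbol => contarLoopA enemy_simbol test_simbol lista_valores 0

-- ===== PORT B =====
def contar_igualdad_alt (lista_valores : List String) (test_simbol : String) : Int :=
  match PySem.List.index? ["O", "X"] test_simbol with
  | none => 0   -- ValueError in Python; excluded by Pre_
  | some i =>
    match PySem.List.pyGet? ["O", "X"] ((i : Int) - 1) with
    | none => 0 -- unreachable
    | some enemy_simbol =>
      -- counts[x] = counts.get(x, 0) + 1 over lista_valores
      let counts : PySem.Dict String Int :=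
        lista_valores.foldl (fun d x => d.modify x 0 (· + 1)) PySem.Dict.empty
      if counts.getD enemy_simbol 0 ≠ 0 then 0
      else counts.getD test_simbol 0

-- ===== PRECONDITION & SPEC =====
-- Pre_ excludes exactly the inputs where lista_simbolo.index raises ValueError (unknown symbol).
def Pre_contar_igualdad (_lista_valores : List String) (test_simbol : String) : Prop :=
  test_simbol = "O" ∨ test_simbol = "X"
instance (lista_valores : List String) (test_simbol : String) : Decidable (Pre_contar_igualdad lista_valores test_simbol) := by unfold Pre_contar_igualdad; infer_instance

def pvWitness_contar_igualdad : List String × String := (["X", "", "X"], "X")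

def Spec_contar_igualdad (lista_valores : List String) (test_simbol : String) (out : Int) : Prop := out = contar_igualdad_alt lista_valores test_simbol
instance (lista_valores : List String) (test_simbol : String) (out : Int) : Decidable (Spec_contar_igualdad lista_valores test_simbol out) := by unfold Spec_contar_igualdad; infer_instance

-- ===== CLAIM =====
def Claim_equal_contar_igualdad : Prop := ∀ (lista_valores : List String) (test_simbol : String), Dom_contar_igualdad lista_valores test_simbol → Pre_contar_igualdad lista_valores test_simbol → Spec_contar_igualdad lista_valores test_simbol (contar_igualdad lista_valores test_simbol)

-- ===== LEMMAS AND PROOFS =====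
lemma contarLoopA_eq (enemy test : String) (lv : List String) (c : Int) :
    contarLoopA enemy test lv c =
      if enemy ∈ lv then 0 else c + (lv.count test : Int) := by
  induction lv generalizing c with
  | nil => simp [contarLoopA]
  | cons x xs ih =>
    simp only [contarLoopA, List.mem_cons, List.count_cons]
    by_cases hx : x = enemy
    · simp [hx]
    · have hex : ¬ enemy = x := fun h => hx h.symm
      rw [if_neg hx, ih]
      by_cases hm : enemy ∈ xs
      · simp [hm]
      · by_cases ht : x = test
        · subst ht
          simp [hm, hex]
          omega
        · simp [hm, hex, ht]

lemma counterFold_getD (lv : List String) (s : String) :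
    (lv.foldl (fun d x => d.modify x 0 (· + 1)) PySem.Dict.empty).getD s 0
      = (lv.count s : Int) := by
  have h : lv.foldl (fun d x => d.modify x 0 (· + 1)) PySem.Dict.empty
      = PySem.Dict.counter lv := (PySem.Dict.counter_eq_foldl lv).symm
  rw [h, PySem.Dict.getD_counter]

-- ===== VERDICT =====
theorem contar_igualdad_spec : Claim_equal_contar_igualdad := by
  intro lv t _ hpre
  unfold Spec_contar_igualdad contar_igualdad contar_igualdad_alt
  rcases hpre with h | h
  · subst h
    have hi : PySem.List.index? ["O", "X"] "O" = some 0 := by decide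
    have hg : PySem.List.pyGet? ["O", "X"] (((0 : Nat) : Int) - 1) = some "X" := by decide
    simp only [hi, hg, contarLoopA_eq, counterFold_getD]
    by_cases hm : "X" ∈ lv
    · have h1 : lv.count "X" ≠ 0 := by have := List.count_pos_iff.mpr hm; omega
      simp [hm, h1]
    · simp [hm, List.count_eq_zero_of_not_mem hm]
  · subst h
    have hi : PySem.List.index? ["O", "X"] "X" = some 1 := by decide
    have hg : PySem.List.pyGet? ["O", "X"] (((1 : Nat) : Int) - 1) = some "O" := by decide
    simp only [hi, hg, contarLoopA_eq, counterFold_getD]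
    by_cases hm : "O" ∈ lv
    · have h1 : lv.count "O" ≠ 0 := by have := List.count_pos_iff.mpr hm; omega
      simp [hm, h1]
    · simp [hm, List.count_eq_zero_of_not_mem hm]
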